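-- pv_equiv track=rewrite | github.com/Pranav-d33/1sample_mosdac_kg_project | streamlit_app.py | get_triples
-- ===== SOURCE A (Python) =====
-- def get_triples(graph_data, entities):
--     if not graph_data or not entities or "edges" not in graph_data:
--         return []
--
--     triples = []
--     for entity in entities:
--         for edge in graph_data.get("edges", []):
--             source = edge.get("source")
--             target = edge.get("target")
--             relation = edge.get("relationship", "related_to")
--
--             if source == entity:
--                 triples.append((source, relation, target))
--             elif target == entity:
--                 triples.append((target, relation, source))
--
--     return triples[:8]
-- ===== SOURCE B (Python) =====
-- def get_triples(graph_data, entities):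
--     if not graph_data or not entities or "edges" not in graph_data:
--         return []
--
--     # One pass over the edges: index node -> its triples, in edge order.
--     index = {}
--     for edge in graph_data["edges"]:
--         s = edge.get("source")
--         t = edge.get("target")
--         r = edge.get("relationship", "related_to")
--         if s is not None:
--             index.setdefault(s, []).append((s, r, t))
--         if t is not None and t != s:
--             index.setdefault(t, []).append((t, r, s))
--
--     out = []
--     for entity in entities:
--         out.extend(index.get(entity, ()))
--         if len(out) >= 8:
--             break
--     return out[:8]
-- ===== Notes on version B (the rewrite author's own statement) =====
-- stated objective: alternative
-- what changed: B replaces A's nested entities-by-edges scan with a single pass over the edges that builds a node-to-triples index, then emits the indexed triples per entity with an early stop once 8 are collected.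
import Mathlib
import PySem

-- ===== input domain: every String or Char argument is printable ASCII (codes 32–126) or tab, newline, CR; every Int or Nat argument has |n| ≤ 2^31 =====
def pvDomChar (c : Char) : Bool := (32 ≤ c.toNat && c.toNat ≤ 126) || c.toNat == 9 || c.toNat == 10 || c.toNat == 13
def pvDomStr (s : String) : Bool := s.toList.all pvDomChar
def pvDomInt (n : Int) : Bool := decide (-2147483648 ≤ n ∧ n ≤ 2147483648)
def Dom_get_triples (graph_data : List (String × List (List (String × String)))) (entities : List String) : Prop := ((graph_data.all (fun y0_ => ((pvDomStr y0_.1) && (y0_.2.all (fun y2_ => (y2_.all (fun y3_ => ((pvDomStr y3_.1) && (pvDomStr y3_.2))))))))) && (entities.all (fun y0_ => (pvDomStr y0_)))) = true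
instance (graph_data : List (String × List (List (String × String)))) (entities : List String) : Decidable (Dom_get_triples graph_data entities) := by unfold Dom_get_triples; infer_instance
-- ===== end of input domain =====

-- B builds a node→triples index in one pass over the edges and emits per entity with an
-- early stop at 8 triples, replacing A's entities×edges double scan (objective: alternative).

-- ===== PORT A =====
-- inner loop body of A: the if/elif over one edge for a fixed entity
-- (edge.get("target")/("source") may be None in Python; Pre_ below guarantees the key is
-- present in every branch that appends, so '.getD ""' is exact there)
def edgeStepA (entity : String) (acc : List (String × String × String)) (edge : List (String × String)) : List (String × String × String) :=
  let source := (PySem.Dict.mk edge).get? "source"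
  let target := (PySem.Dict.mk edge).get? "target"
  let relation := (PySem.Dict.mk edge).getD "relationship" "related_to"
  if source = some entity then acc ++ [(entity, relation, target.getD "")]
  else if target = some entity then acc ++ [(entity, relation, source.getD "")]
  else acc

def get_triples (graph_data : List (String × List (List (String × String)))) (entities : List String) : List (String × String × String) :=
  if graph_data = [] ∨ entities = [] ∨ ¬ (PySem.Dict.mk graph_data).contains "edges" = true then []
  else
    PySem.List.slice
      (entities.foldl (fun acc entity =>
        ((PySem.Dict.mk graph_data).getD "edges" []).foldl (edgeStepA entity) acc) [])
      none (some 8)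

-- ===== PORT B =====
-- one edge of B's indexing pass: append the edge's triple(s) to the source/target buckets
def indexStepB (idx : PySem.Dict String (List (String × String × String))) (edge : List (String × String)) : PySem.Dict String (List (String × String × String)) :=
  let s := (PySem.Dict.mk edge).get? "source"
  let t := (PySem.Dict.mk edge).get? "target"
  let r := (PySem.Dict.mk edge).getD "relationship" "related_to"
  let idx1 := match s with
    | some sv => idx.insert sv (idx.getD sv [] ++ [(sv, r, t.getD "")])
    | none => idx
  match t with
  | some tv => if s = some tv then idx1 else idx1.insert tv (idx1.getD tv [] ++ [(tv, r, s.getD "")])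
  | none => idx1

def getTriplesIndex (edges : List (List (String × String))) : PySem.Dict String (List (String × String × String)) :=
  edges.foldl indexStepB PySem.Dict.empty

-- B's emit loop: extend with the entity's bucket, break as soon as 8 are collected
def emitTriples (index : PySem.Dict String (List (String × String × String))) : List String → List (String × String × String) → List (String × String × String)
  | [], out => out
  | e :: es, out =>
    let out' := out ++ index.getD e []
    if 8 ≤ out'.length then out' else emitTriples index es out'

def get_triples_alt (graph_data : List (String × List (List (String × String)))) (entities : List String) : List (String × String × String) :=
  if graph_data = [] ∨ entities = [] ∨ ¬ (PySem.Dict.mk graph_data).contains "edges" = true then []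
  else
    PySem.List.slice
      (emitTriples (getTriplesIndex ((PySem.Dict.mk graph_data).getD "edges" [])) entities [])
      none (some 8)

-- ===== PRECONDITION & SPEC =====
-- Pre_ excludes edges whose "source" (resp. "target") value is one of the entities while the
-- opposite endpoint key is missing: there Python A's appended triple contains None, which is
-- not a String, so A's result is not a value of the declared type.
def Pre_get_triples (graph_data : List (String × List (List (String × String)))) (entities : List String) : Prop :=
  ∀ edge ∈ (PySem.Dict.mk graph_data).getD "edges" [],
    ((∃ e ∈ entities, (PySem.Dict.mk edge).get? "source" = some e) → ((PySem.Dict.mk edge).get? "target").isSome = true) ∧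
    ((∃ e ∈ entities, (PySem.Dict.mk edge).get? "target" = some e) → ((PySem.Dict.mk edge).get? "source").isSome = true)
instance (graph_data : List (String × List (List (String × String)))) (entities : List String) : Decidable (Pre_get_triples graph_data entities) := by unfold Pre_get_triples; infer_instance

def pvWitness_get_triples : (List (String × List (List (String × String)))) × List String :=
  ([("edges", [[("source", "a"), ("target", "b")]])], ["a", "c"])

def Spec_get_triples (graph_data : List (String × List (List (String × String)))) (entities : List String) (out : List (String × String × String)) : Prop := out = get_triples_alt graph_data entities
instance (graph_data : List (String × List (List (String × String)))) (entities : List String) (out : List (String × String × String)) : Decidable (Spec_get_triples graph_data entities out) := by unfold Spec_get_triples; infer_instance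

-- ===== CLAIM (what is proved, stated in full; the proofs are below) =====
def Claim_equal_get_triples : Prop := ∀ (graph_data : List (String × List (List (String × String)))) (entities : List String), Dom_get_triples graph_data entities → Pre_get_triples graph_data entities → Spec_get_triples graph_data entities (get_triples graph_data entities)

-- ===== LEMMAS AND PROOFS =====

-- the triple an edge contributes for a given entity (at most one, source match preferred)
def tripOf (entity : String) (edge : List (String × String)) : Option (String × String × String) :=
  let s := (PySem.Dict.mk edge).get? "source"
  let t := (PySem.Dict.mk edge).get? "target"
  let r := (PySem.Dict.mk edge).getD "relationship" "related_to"
  if s = some entity then some (entity, r, t.getD "")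
  else if t = some entity then some (entity, r, s.getD "")
  else none

theorem edgeStepA_eq (entity : String) (acc : List (String × String × String)) (edge : List (String × String)) :
    edgeStepA entity acc edge = acc ++ (tripOf entity edge).toList := by
  simp only [edgeStepA, tripOf]
  split_ifs <;> simp

theorem foldA_inner (entity : String) : ∀ (edges : List (List (String × String))) (acc : List (String × String × String)),
    edges.foldl (edgeStepA entity) acc = acc ++ edges.filterMap (tripOf entity)
  | [], acc => by simp
  | edge :: edges, acc => by
    simp only [List.foldl_cons, foldA_inner entity edges, edgeStepA_eq, List.filterMap_cons]
    cases tripOf entity edge <;> simp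

theorem indexStepB_getD (idx : PySem.Dict String (List (String × String × String))) (edge : List (String × String)) (e : String) :
    (indexStepB idx edge).getD e [] = idx.getD e [] ++ (tripOf e edge).toList := by
  simp only [indexStepB, tripOf]
  rcases hs : (PySem.Dict.mk edge).get? "source" with _ | sv <;>
    rcases ht : (PySem.Dict.mk edge).get? "target" with _ | tv
  · simp
  · by_cases h : e = tv
    · simp [PySem.Dict.getD_insert, h]
    · simp [PySem.Dict.getD_insert, h, Ne.symm h]
  · by_cases h : e = sv
    · simp [PySem.Dict.getD_insert, h]
    · simp [PySem.Dict.getD_insert, h, Ne.symm h]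
  · by_cases hst : sv = tv
    · by_cases h : e = sv
      · simp [PySem.Dict.getD_insert, hst, h]
      · have h' : ¬ e = tv := hst ▸ h
        simp [PySem.Dict.getD_insert, hst, h', Ne.symm h']
    · by_cases h1 : e = sv
      · simp [PySem.Dict.getD_insert, hst, Ne.symm hst, h1]
      · by_cases h2 : e = tv
        · simp [PySem.Dict.getD_insert, hst, Ne.symm hst, h1, Ne.symm h1, h2]
        · simp [PySem.Dict.getD_insert, hst, Ne.symm hst, h1, Ne.symm h1, h2, Ne.symm h2]

theorem index_getD : ∀ (edges : List (List (String × String))) (idx : PySem.Dict String (List (String × String × String))) (e : String),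
    (edges.foldl indexStepB idx).getD e [] = idx.getD e [] ++ edges.filterMap (tripOf e)
  | [], idx, e => by simp
  | edge :: edges, idx, e => by
    simp only [List.foldl_cons, index_getD edges, indexStepB_getD, List.filterMap_cons]
    cases tripOf e edge <;> simp

theorem emit_take (index : PySem.Dict String (List (String × String × String))) :
    ∀ (es : List String) (out : List (String × String × String)),
    (emitTriples index es out).take 8 = (out ++ es.flatMap (fun e => index.getD e [])).take 8
  | [], out => by simp [emitTriples]
  | e :: es, out => by
    simp only [emitTriples, List.flatMap_cons]
    split_ifs with h
    · conv_rhs => rw [← List.append_assoc, List.take_append]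
      have h0 : 8 - (out ++ index.getD e []).length = 0 := by omega
      rw [h0]
      simp
    · rw [emit_take index es (out ++ index.getD e [])]
      simp

-- ===== VERDICT (by name: the statement is the Claim_ definition above) =====
theorem get_triples_spec : Claim_equal_get_triples := by
  intro graph_data entities _ _
  unfold Spec_get_triples get_triples get_triples_alt
  split_ifs with h
  · rfl
  · rw [PySem.List.slice_to _ (by norm_num), PySem.List.slice_to _ (by norm_num),
      show Int.toNat 8 = 8 from rfl]
    have outer : ∀ (ents : List String) (acc : List (String × String × String)),
        ents.foldl (fun acc entity =>
          ((PySem.Dict.mk graph_data).getD "edges" []).foldl (edgeStepA entity) acc) acc =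
        acc ++ ents.flatMap (fun e => ((PySem.Dict.mk graph_data).getD "edges" []).filterMap (tripOf e)) := by
      intro ents
      induction ents with
      | nil => simp
      | cons e es ih =>
        intro acc
        rw [List.foldl_cons, ih, foldA_inner]
        simp
    have hidx : ∀ e : String,
        (getTriplesIndex ((PySem.Dict.mk graph_data).getD "edges" [])).getD e [] =
        ((PySem.Dict.mk graph_data).getD "edges" []).filterMap (tripOf e) := by
      intro e
      rw [getTriplesIndex, index_getD]
      simp
    rw [outer, emit_take]
    simp only [hidx, List.nil_append]
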